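-- pv_equiv track=rewrite | github.com/yukienomiya/fondamenti_nomiya.1744602 | Exercises/Ex78/program.py | getSubstrings
-- ===== SOURCE A (Python) =====
-- def getSubstrings(s, idx, substr, res):
--   if (idx == len(s)):
--     if (len(substr) != 0):
--       if (list(substr) == sorted(list(substr))):
--         res.append(substr)
--   else:
--     getSubstrings(s, idx + 1, substr, res)
--     getSubstrings(s, idx + 1, substr + s[idx], res)
--   return res
-- ===== SOURCE B (Python) =====
-- def getSubstrings(s, idx, substr, res):
--   n = len(s) - idx
--   for mask in range(2 ** n):
--     cur = substr + ''.join(s[idx + j] for j in range(n) if (mask >> (n - 1 - j)) % 2 == 1)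
--     if len(cur) != 0 and list(cur) == sorted(list(cur)):
--       res.append(cur)
--   return res
-- ===== Notes on version B (the rewrite author's own statement) =====
-- stated objective: alternative
-- what changed: replaced the skip/include recursion by a single loop over bitmasks 0..2^n-1 (n = len(s)-idx, position idx as the most significant bit), building each candidate subsequence directly and appending it when nonempty and sorted
import Mathlib
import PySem

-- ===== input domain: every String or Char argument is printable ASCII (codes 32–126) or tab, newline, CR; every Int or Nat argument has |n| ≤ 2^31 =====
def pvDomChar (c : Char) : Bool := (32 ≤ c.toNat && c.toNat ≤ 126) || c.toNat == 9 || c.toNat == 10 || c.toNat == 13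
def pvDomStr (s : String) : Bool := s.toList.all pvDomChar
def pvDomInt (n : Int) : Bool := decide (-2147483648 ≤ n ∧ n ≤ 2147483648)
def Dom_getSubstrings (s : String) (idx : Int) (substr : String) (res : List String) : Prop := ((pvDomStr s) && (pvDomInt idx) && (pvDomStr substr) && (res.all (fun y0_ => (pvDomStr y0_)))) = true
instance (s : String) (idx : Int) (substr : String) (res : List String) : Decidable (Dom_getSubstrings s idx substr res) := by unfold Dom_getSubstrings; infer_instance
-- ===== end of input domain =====

-- B replaces A's skip/include recursion by one loop over bitmasks (same result order, same res-append behaviour);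
-- objective: alternative decomposition, no speed claim.  Both A and B mutate `res` in Python (append); the
-- equivalence proved here is about the RETURN value.

-- ===== PORT A =====
-- A's recursion terminates in Python only for idx ≤ len(s); the fuel counts the remaining recursion depth
-- len(s) - idx and the fuel-0 fallback / pyGet?-none fallback are unreachable under Pre_.
def getSubstringsGo (s : String) (idx : Int) (substr : String) (res : List String) : Nat → List String
  | 0 =>
    if idx = PySem.Str.len s then
      if substr.toList.length ≠ 0 then
        if substr.toList = PySem.List.sorted substr.toList (fun c => c) false then res ++ [substr]
        else res
      else res
    else res  -- unreachable under Pre_ (Python recurses without bound when idx > len(s))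
  | fuel + 1 =>
    if idx = PySem.Str.len s then
      if substr.toList.length ≠ 0 then
        if substr.toList = PySem.List.sorted substr.toList (fun c => c) false then res ++ [substr]
        else res
      else res
    else
      let res1 := getSubstringsGo s (idx + 1) substr res fuel
      match PySem.Str.pyGet? s idx with
      | none => res1  -- IndexError in Python, unreachable under Pre_
      | some c => getSubstringsGo s (idx + 1) (String.ofList (substr.toList ++ [c])) res1 fuel

def getSubstrings (s : String) (idx : Int) (substr : String) (res : List String) : List String :=
  getSubstringsGo s idx substr res (PySem.Str.len s - idx).toNat

-- ===== PORT B =====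
-- ''.join(s[idx + j] for j in range(n) if (mask >> (n - 1 - j)) % 2 == 1)
def altPick (s : String) (idx : Int) (n : Nat) (mask : Nat) : List Char :=
  (List.range n).filterMap fun j =>
    if mask >>> (n - 1 - j) % 2 = 1 then PySem.Str.pyGet? s (idx + j) else none

def getSubstrings_alt (s : String) (idx : Int) (substr : String) (res : List String) : List String :=
  let n : Int := PySem.Str.len s - idx
  (PySem.List.pyRange 0 ((2 ^ n.toNat : Nat) : Int) 1).foldl
    (fun acc mask =>
      let cur := String.ofList (substr.toList ++ altPick s idx n.toNat mask.toNat)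
      if cur.toList.length ≠ 0 ∧ cur.toList = PySem.List.sorted cur.toList (fun c => c) false
      then acc ++ [cur] else acc)
    res

-- ===== PRECONDITION & SPEC =====
-- Exactly the inputs on which Python A returns: for idx < -len(s) A raises IndexError,
-- for idx > len(s) A recurses without bound (RecursionError).
def Pre_getSubstrings (s : String) (idx : Int) (substr : String) (res : List String) : Prop :=
  -(PySem.Str.len s) ≤ idx ∧ idx ≤ PySem.Str.len s
instance (s : String) (idx : Int) (substr : String) (res : List String) : Decidable (Pre_getSubstrings s idx substr res) := by unfold Pre_getSubstrings; infer_instance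

def pvWitness_getSubstrings : String × Int × String × List String := ("ba", 0, "", [])

def Spec_getSubstrings (s : String) (idx : Int) (substr : String) (res : List String) (out : List String) : Prop := out = getSubstrings_alt s idx substr res
instance (s : String) (idx : Int) (substr : String) (res : List String) (out : List String) : Decidable (Spec_getSubstrings s idx substr res out) := by unfold Spec_getSubstrings; infer_instance

-- ===== CLAIM (what is proved, stated in full; the proofs are below) =====
def Claim_equal_getSubstrings : Prop := ∀ (s : String) (idx : Int) (substr : String) (res : List String), Dom_getSubstrings s idx substr res → Pre_getSubstrings s idx substr res → Spec_getSubstrings s idx substr res (getSubstrings s idx substr res)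

-- ===== LEMMAS AND PROOFS =====

-- the candidate strings, in A's (and B's) emission order
def cand (substr : List Char) : List Char → List (List Char)
  | [] => [substr]
  | c :: cs => cand substr cs ++ cand (substr ++ [c]) cs

-- the filter both programs apply
def okB (l : List Char) : Bool :=
  decide (l.length ≠ 0 ∧ l = PySem.List.sorted l (fun c => c) false)

-- the characters s[idx], s[idx+1], …, s[idx+f-1] (Python indexing)
def chars (s : String) (idx : Int) : Nat → List Char
  | 0 => []
  | f + 1 => ((PySem.Str.pyGet? s idx).getD 'a') :: chars s (idx + 1) f

theorem length_chars (s : String) (idx : Int) (f : Nat) : (chars s idx f).length = f := by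
  induction f generalizing idx with
  | zero => rfl
  | succ f ih => simp [chars, ih]

theorem pyGet?_isSome (s : String) (idx : Int) (h1 : -(PySem.Str.len s) ≤ idx)
    (h2 : idx < PySem.Str.len s) : ∃ c, PySem.Str.pyGet? s idx = some c := by
  rw [PySem.Str.pyGet?_eq]
  rcases h : PySem.List.pyGet? s.toList idx with _ | c
  · rw [PySem.List.pyGet?_eq_none_iff] at h
    exact absurd ⟨by rw [PySem.Str.len_eq] at h1; exact_mod_cast h1,
                  by rw [PySem.Str.len_eq] at h2; exact_mod_cast h2⟩ h
  · exact ⟨c, h⟩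

theorem chars_get (s : String) (idx : Int) (f : Nat) (h1 : -(PySem.Str.len s) ≤ idx)
    (h2 : idx + f ≤ PySem.Str.len s) :
    ∀ j, j < f → PySem.Str.pyGet? s (idx + j) = (chars s idx f)[j]? := by
  induction f generalizing idx with
  | zero => omega
  | succ f ih =>
    intro j hj
    match j with
    | 0 =>
      obtain ⟨c, hc⟩ := pyGet?_isSome s idx h1 (by push_cast at h2 ⊢; omega)
      rw [PySem.Str.pyGet?_eq] at hc; simp only [PySem.Chars.pyGet?] at hc
      simp [chars, hc]
    | j + 1 =>
      have e : idx + ((j + 1 : Nat) : Int) = (idx + 1) + (j : Nat) := by push_cast; ring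
      rw [e, ih (idx + 1) (by omega) (by push_cast at h2 ⊢; omega) j (by omega)]
      simp [chars]

theorem goA_eq (s : String) (f : Nat) (idx : Int) (substr : String) (res : List String)
    (h1 : -(PySem.Str.len s) ≤ idx) (h2 : idx + f = PySem.Str.len s) :
    getSubstringsGo s idx substr res f
      = res ++ ((cand substr.toList (chars s idx f)).filter okB).map String.ofList := by
  induction f generalizing idx substr res with
  | zero =>
    have hi : idx = PySem.Str.len s := by push_cast at h2; omega
    simp only [getSubstringsGo, if_pos hi, chars, cand]
    by_cases hl : substr.toList.length ≠ 0
    · by_cases hs : substr.toList = PySem.List.sorted substr.toList (fun c => c) false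
      · have hok : okB substr.toList = true := by rw [okB]; exact decide_eq_true ⟨hl, hs⟩
        rw [if_pos hl, if_pos hs]
        simp only [List.filter_cons, List.filter_nil, hok, if_true, List.map_cons, List.map_nil,
          String.ofList_toList]
      · have hok : okB substr.toList = false := by
          rw [okB]; exact decide_eq_false (fun h => hs h.2)
        rw [if_pos hl, if_neg hs]
        simp [hok]
    · have hok : okB substr.toList = false := by
        rw [okB]; exact decide_eq_false (fun h => hl h.1)
      rw [if_neg hl]
      simp [hok]
  | succ f ih =>
    have hi : idx ≠ PySem.Str.len s := by push_cast at h2; omega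
    obtain ⟨c, hc⟩ := pyGet?_isSome s idx h1 (by push_cast at h2 ⊢; omega)
    have hch : chars s idx (f + 1) = c :: chars s (idx + 1) f := by
      simp [chars]
      rw [PySem.Str.pyGet?_eq] at hc; simp only [PySem.Chars.pyGet?] at hc
      simp [hc]
    simp only [getSubstringsGo, if_neg hi, hc, hch, cand]
    rw [ih (idx + 1) substr res (by omega) (by push_cast at h2 ⊢; omega),
        ih (idx + 1) (String.ofList (substr.toList ++ [c])) _ (by omega) (by push_cast at h2 ⊢; omega)]
    simp

def pickL (cs : List Char) (mask : Nat) : List Char :=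
  (List.range cs.length).filterMap fun j =>
    if mask >>> (cs.length - 1 - j) % 2 = 1 then cs[j]? else none

theorem pick_lo (c : Char) (cs : List Char) (m : Nat) (hm : m < 2 ^ cs.length) :
    pickL (c :: cs) m = pickL cs m := by
  unfold pickL
  simp only [List.length_cons, List.range_succ_eq_map, List.filterMap_cons, List.filterMap_map]
  have h0 : m >>> (cs.length + 1 - 1 - 0) % 2 = 0 := by
    rw [Nat.shiftRight_eq_div_pow]
    simp [Nat.div_eq_of_lt hm]
  simp only [h0, Nat.zero_ne_one, if_false]
  refine List.filterMap_congr ?_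
  intro j hj
  simp only [Function.comp, Nat.succ_eq_add_one]
  have e : cs.length + 1 - 1 - (j + 1) = cs.length - 1 - j := by omega
  rw [e]
  rfl

theorem pick_hi (c : Char) (cs : List Char) (m : Nat) (hm : m < 2 ^ cs.length) :
    pickL (c :: cs) (2 ^ cs.length + m) = c :: pickL cs m := by
  unfold pickL
  simp only [List.length_cons, List.range_succ_eq_map, List.filterMap_cons, List.filterMap_map]
  have h0 : (2 ^ cs.length + m) >>> (cs.length + 1 - 1 - 0) % 2 = 1 := by
    rw [Nat.shiftRight_eq_div_pow]
    simp only [Nat.add_sub_cancel, Nat.sub_zero]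
    rw [Nat.add_comm, Nat.add_div_right _ (Nat.two_pow_pos _),
        Nat.div_eq_of_lt hm]
  simp only [h0, List.getElem?_cons_zero, if_true]
  congr 1
  refine List.filterMap_congr ?_
  intro j hj
  simp only [Function.comp, Nat.succ_eq_add_one]
  have hjn : j < cs.length := List.mem_range.mp hj
  have e : cs.length + 1 - 1 - (j + 1) = cs.length - 1 - j := by omega
  rw [e]
  have hsh : (2 ^ cs.length + m) >>> (cs.length - 1 - j) % 2 = m >>> (cs.length - 1 - j) % 2 := by
    set k := cs.length - 1 - j with hk
    have hkn : k < cs.length := by omega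
    rw [Nat.shiftRight_eq_div_pow, Nat.shiftRight_eq_div_pow]
    have hpow : 2 ^ cs.length = 2 ^ (cs.length - k) * 2 ^ k := by
      rw [← Nat.pow_add]; congr 1; omega
    rw [hpow, Nat.add_comm, Nat.add_mul_div_right _ _ (Nat.two_pow_pos _)]
    have heven : 2 ^ (cs.length - k) % 2 = 0 := by
      have : cs.length - k = (cs.length - k - 1) + 1 := by omega
      rw [this, Nat.pow_succ]; omega
    omega
  rw [hsh]
  rfl

theorem masks_eq (cs : List Char) (substr : List Char) :
    (List.range (2 ^ cs.length)).map (fun m => substr ++ pickL cs m) = cand substr cs := by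
  induction cs generalizing substr with
  | nil => simp [pickL, cand]
  | cons c cs ih =>
    have hlen : 2 ^ (c :: cs).length = 2 ^ cs.length + 2 ^ cs.length := by
      simp [List.length_cons, Nat.pow_succ]; omega
    rw [hlen, List.range_add, List.map_append, List.map_map]
    have hfst : (List.range (2 ^ cs.length)).map (fun m => substr ++ pickL (c :: cs) m)
        = (List.range (2 ^ cs.length)).map (fun m => substr ++ pickL cs m) := by
      refine List.map_congr_left ?_
      intro m hm
      rw [pick_lo c cs m (List.mem_range.mp hm)]
    have hsnd : (List.range (2 ^ cs.length)).map
          ((fun m => substr ++ pickL (c :: cs) m) ∘ (fun x => 2 ^ cs.length + x))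
        = (List.range (2 ^ cs.length)).map (fun m => (substr ++ [c]) ++ pickL cs m) := by
      refine List.map_congr_left ?_
      intro m hm
      simp only [Function.comp]
      rw [pick_hi c cs m (List.mem_range.mp hm)]
      simp
    rw [hfst, hsnd, ih substr, ih (substr ++ [c])]
    rfl

theorem altB_eq (s : String) (idx : Int) (substr : String) (res : List String)
    (h1 : -(PySem.Str.len s) ≤ idx) (h2 : idx ≤ PySem.Str.len s) :
    getSubstrings_alt s idx substr res
      = res ++ ((cand substr.toList (chars s idx (PySem.Str.len s - idx).toNat)).filter okB).map String.ofList := by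
  unfold getSubstrings_alt
  dsimp only
  set N := (PySem.Str.len s - idx).toNat with hN
  set cs := chars s idx N with hcs
  have hlen : cs.length = N := length_chars s idx N
  have hNle : idx + (N : Int) ≤ PySem.Str.len s := by omega
  have hpick : ∀ m : Nat, altPick s idx N m = pickL cs m := by
    intro m
    unfold altPick pickL
    rw [hlen]
    refine List.filterMap_congr ?_
    intro j hj
    rw [chars_get s idx N h1 hNle j (List.mem_range.mp hj)]
  rw [PySem.List.pyRange_zero_natCast, List.foldl_map]
  simp only [Int.toNat_natCast, String.toList_ofList, hpick]
  rw [PySem.List.foldl_append_ite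
        (p := fun m : Nat => (substr.toList ++ pickL cs m).length ≠ 0 ∧
          substr.toList ++ pickL cs m
            = PySem.List.sorted (substr.toList ++ pickL cs m) (fun c => c) false)
        (f := fun m : Nat => String.ofList (substr.toList ++ pickL cs m))]
  congr 1
  have hfil : (fun m : Nat => decide ((substr.toList ++ pickL cs m).length ≠ 0 ∧
          substr.toList ++ pickL cs m
            = PySem.List.sorted (substr.toList ++ pickL cs m) (fun c => c) false))
      = fun m : Nat => okB (substr.toList ++ pickL cs m) := by
    funext m; rw [okB]
  rw [hfil]
  have key : (List.range (2 ^ N)).map (fun m => substr.toList ++ pickL cs m)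
      = cand substr.toList cs := by
    rw [← hlen]; exact masks_eq cs substr.toList
  calc (List.filter (fun m : Nat => okB (substr.toList ++ pickL cs m)) (List.range (2 ^ N))).map
          (fun m : Nat => String.ofList (substr.toList ++ pickL cs m))
      = ((List.filter (okB ∘ fun m : Nat => substr.toList ++ pickL cs m) (List.range (2 ^ N))).map
          (fun m : Nat => substr.toList ++ pickL cs m)).map String.ofList := by
        rw [List.map_map]; rfl
    _ = (List.filter okB ((List.range (2 ^ N)).map (fun m => substr.toList ++ pickL cs m))).map
          String.ofList := by rw [List.filter_map]
    _ = (List.filter okB (cand substr.toList cs)).map String.ofList := by rw [key]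

-- ===== VERDICT (by name: the statement is the Claim_ definition above) =====
theorem getSubstrings_spec : Claim_equal_getSubstrings := by
  intro s idx substr res _ hpre
  obtain ⟨h1, h2⟩ := hpre
  unfold Spec_getSubstrings getSubstrings
  rw [goA_eq s (PySem.Str.len s - idx).toNat idx substr res h1 (by omega),
      altB_eq s idx substr res h1 h2]
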